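-- pv_equiv track=rewrite | github.com/MPZ-00/m5squared | m25_bluetooth.py | find_real_header
-- ===== SOURCE A (Python) =====
-- def find_real_header(buffer):
--     """Find position of real 0xEF header (not EFEF escape) in buffer"""
--     i = 0
--     while i < len(buffer):
--         if buffer[i] == 0xEF:
--             if i + 1 < len(buffer) and buffer[i + 1] == 0xEF:
--                 i += 2  # Skip escape sequence
--                 continue
--             return i  # Real header
--         i += 1
--     return -1
-- ===== SOURCE B (Python) =====
-- def find_real_header(buffer):
--     """Find position of real 0xEF header (not EFEF escape) in buffer"""
--     n = len(buffer)
--     i = 0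
--     while i < n:
--         if buffer[i] != 0xEF:
--             i += 1
--             continue
--         start = i
--         while i < n and buffer[i] == 0xEF:
--             i += 1
--         if (i - start) % 2 == 1:
--             return i - 1
--     return -1
-- ===== Notes on version B (the rewrite author's own statement) =====
-- stated objective: alternative
-- what changed: Replaces the pairwise skip-two scan with a run-based scan: each maximal run of 0xEF bytes is consumed by one inner loop and its length parity decides whether its last byte is the real header.
import Mathlib
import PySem

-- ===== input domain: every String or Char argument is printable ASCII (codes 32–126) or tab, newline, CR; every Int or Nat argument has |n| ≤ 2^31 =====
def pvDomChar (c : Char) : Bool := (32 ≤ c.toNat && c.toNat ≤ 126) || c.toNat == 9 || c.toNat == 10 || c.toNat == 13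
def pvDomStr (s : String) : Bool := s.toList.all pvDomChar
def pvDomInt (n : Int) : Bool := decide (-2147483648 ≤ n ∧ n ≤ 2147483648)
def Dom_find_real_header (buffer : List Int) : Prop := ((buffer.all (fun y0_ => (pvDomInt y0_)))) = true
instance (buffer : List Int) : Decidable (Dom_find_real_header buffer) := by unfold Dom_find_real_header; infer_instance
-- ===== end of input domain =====

-- B replaces A's pairwise skip-two scan with a run-based scan (consume each maximal 0xEF run, odd length ⇒ header); same O(n) cost, different decomposition.
-- Both loops carry a fuel argument (length + 1 steps always suffice) purely to make the recursion structural; it changes no computed value.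

-- ===== PORT A =====
-- A's while loop: index i, skip EF pairs, return first unpaired EF, else -1.
def findGoA (buffer : List Int) : Nat → Nat → Int
  | 0, _ => -1
  | fuel + 1, i =>
    if i < buffer.length then
      if buffer.getD i 0 = 0xEF then
        if i + 1 < buffer.length ∧ buffer.getD (i + 1) 0 = 0xEF then
          findGoA buffer fuel (i + 2)   -- skip escape sequence
        else
          (i : Int)                     -- real header
      else
        findGoA buffer fuel (i + 1)
    else
      -1

def find_real_header (buffer : List Int) : Int := findGoA buffer (buffer.length + 1) 0

-- ===== PORT B =====
-- inner loop of B: advance i while buffer[i] == 0xEF (fuel length - i suffices)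
def runEnd (buffer : List Int) : Nat → Nat → Nat
  | 0, i => i
  | fuel + 1, i =>
    if i < buffer.length ∧ buffer.getD i 0 = 0xEF then runEnd buffer fuel (i + 1) else i

-- outer loop of B: run-based scan with parity test
def findGoB (buffer : List Int) : Nat → Nat → Int
  | 0, _ => -1
  | fuel + 1, i =>
    if i < buffer.length then
      if buffer.getD i 0 = 0xEF then
        if (runEnd buffer (buffer.length - i) i - i) % 2 = 1 then
          ((runEnd buffer (buffer.length - i) i : Int) - 1)
        else
          findGoB buffer fuel (runEnd buffer (buffer.length - i) i)
      else
        findGoB buffer fuel (i + 1)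
    else
      -1

def find_real_header_alt (buffer : List Int) : Int := findGoB buffer (buffer.length + 1) 0

-- ===== PRECONDITION & SPEC =====
def Spec_find_real_header (buffer : List Int) (out : Int) : Prop := out = find_real_header_alt buffer
instance (buffer : List Int) (out : Int) : Decidable (Spec_find_real_header buffer out) := by unfold Spec_find_real_header; infer_instance

-- ===== CLAIM (what is proved, stated in full; the proofs are below) =====
def Claim_equal_find_real_header : Prop := ∀ (buffer : List Int), Dom_find_real_header buffer → Spec_find_real_header buffer (find_real_header buffer)

-- ===== LEMMAS AND PROOFS =====

-- the inner loop never moves backwards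
theorem runEnd_ge (buffer : List Int) (fuel i : Nat) : i ≤ runEnd buffer fuel i := by
  induction fuel generalizing i with
  | zero => simp [runEnd]
  | succ f ih =>
    simp only [runEnd]
    split
    · exact le_trans (by omega) (ih (i + 1))
    · exact le_refl i

-- unfold one step of the canonical-fuel inner loop when the position holds an EF byte
theorem runEnd_cons (buffer : List Int) (i : Nat)
    (hi : i < buffer.length) (he : buffer.getD i 0 = 0xEF) :
    runEnd buffer (buffer.length - i) i = runEnd buffer (buffer.length - (i + 1)) (i + 1) := by
  have hf : buffer.length - i = (buffer.length - (i + 1)) + 1 := by omega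
  rw [hf]
  simp only [runEnd, hi, he, and_self, if_pos]

-- the canonical-fuel inner loop stops exactly at a non-EF position (or the end)
theorem runEnd_stop (buffer : List Int) (i : Nat)
    (h : ¬ (i < buffer.length ∧ buffer.getD i 0 = 0xEF)) :
    runEnd buffer (buffer.length - i) i = i := by
  cases hni : buffer.length - i with
  | zero => simp [runEnd]
  | succ f => simp only [runEnd, h, if_neg, not_false_iff]

-- B's outer loop is fuel-irrelevant once the fuel covers the remaining positions
theorem findGoB_fuel (buffer : List Int) (fuel fuel' i : Nat)
    (h : buffer.length ≤ fuel + i) (h' : buffer.length ≤ fuel' + i) :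
    findGoB buffer fuel i = findGoB buffer fuel' i := by
  induction fuel generalizing fuel' i with
  | zero =>
    have hi : ¬ i < buffer.length := by omega
    cases fuel' with
    | zero => rfl
    | succ g => simp [findGoB, hi]
  | succ f ih =>
    by_cases hi : i < buffer.length
    · cases fuel' with
      | zero => omega
      | succ g =>
        simp only [findGoB, hi, if_pos]
        by_cases he : buffer.getD i 0 = 0xEF
        · simp only [he, if_pos]
          split
          · rfl
          · have hj : i + 1 ≤ runEnd buffer (buffer.length - i) i := by
              rw [runEnd_cons buffer i hi he]
              exact runEnd_ge buffer _ (i + 1)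
            exact ih _ _ (by omega) (by omega)
        · simp only [he, if_neg, not_false_iff]
          exact ih _ _ (by omega) (by omega)
    · cases fuel' with
      | zero => simp [findGoB, hi]
      | succ g => simp [findGoB, hi]

-- main invariant: with enough fuel, A's loop and B's loop agree from every position
theorem findGo_eq (buffer : List Int) (fuel i : Nat)
    (h : buffer.length ≤ fuel + i) :
    findGoA buffer fuel i = findGoB buffer fuel i := by
  induction fuel generalizing i with
  | zero => rfl
  | succ f ih =>
    by_cases hi : i < buffer.length
    · simp only [findGoA, findGoB, hi, if_pos]
      by_cases he : buffer.getD i 0 = 0xEF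
      · simp only [he, if_pos]
        by_cases hp : i + 1 < buffer.length ∧ buffer.getD (i + 1) 0 = 0xEF
        · -- EF pair: A skips two; B's run covers both
          rw [if_pos hp, ih (i + 2) (by omega)]
          have hr01 : runEnd buffer (buffer.length - i) i
              = runEnd buffer (buffer.length - (i + 2)) (i + 2) := by
            rw [runEnd_cons buffer i hi he, runEnd_cons buffer (i + 1) hp.1 hp.2]
          have hge : i + 2 ≤ runEnd buffer (buffer.length - (i + 2)) (i + 2) :=
            runEnd_ge buffer _ (i + 2)
          rw [hr01]
          by_cases h2 : i + 2 < buffer.length ∧ buffer.getD (i + 2) 0 = 0xEF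
          · -- the run continues at i+2: both sides take the EF branch with the same run end
            cases f with
            | zero => omega
            | succ g =>
              have hpar : (runEnd buffer (buffer.length - (i + 2)) (i + 2) - i) % 2
                  = (runEnd buffer (buffer.length - (i + 2)) (i + 2) - (i + 2)) % 2 := by
                omega
              rw [hpar]
              have hrhs : findGoB buffer (g + 1) (i + 2)
                  = if (runEnd buffer (buffer.length - (i + 2)) (i + 2) - (i + 2)) % 2 = 1 then
                      ((runEnd buffer (buffer.length - (i + 2)) (i + 2) : Int) - 1)
                    else
                      findGoB buffer g (runEnd buffer (buffer.length - (i + 2)) (i + 2)) := by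
                simp only [findGoB, h2.1, if_pos, h2.2]
              rw [hrhs]
              by_cases hc : (runEnd buffer (buffer.length - (i + 2)) (i + 2) - (i + 2)) % 2 = 1
              · rw [if_pos hc, if_pos hc]
              · rw [if_neg hc, if_neg hc]
                exact findGoB_fuel buffer g (g + 1) _ (by omega) (by omega)
          · -- the run ends at i+2: even run, B moves on to i+2 with the same fuel
            rw [runEnd_stop buffer (i + 2) h2]
            simp only [Nat.add_sub_cancel_left]
            norm_num
        · -- lone EF: A returns i; B's run is exactly [i, i+1), odd
          rw [if_neg hp]
          have hr : runEnd buffer (buffer.length - i) i = i + 1 := by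
            rw [runEnd_cons buffer i hi he, runEnd_stop buffer (i + 1) hp]
          rw [hr]
          simp only [Nat.add_sub_cancel_left]
          norm_num
      · -- non-EF byte: both advance one step
        simp only [he, if_neg, not_false_iff]
        exact ih (i + 1) (by omega)
    · simp [findGoA, findGoB, hi]

-- ===== VERDICT (by name: the statement is the Claim_ definition above) =====
theorem find_real_header_spec : Claim_equal_find_real_header := by
  intro buffer _
  unfold Spec_find_real_header find_real_header find_real_header_alt
  exact findGo_eq buffer (buffer.length + 1) 0 (by omega)
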